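-- pv_equiv track=rewrite | github.com/STEP-FWD/protocols | scripts/sequential_to_tabular.py | _collect_intro_lines
-- ===== SOURCE A (Python) =====
-- from typing import List, Optional, Tuple
--
-- def _collect_intro_lines(lines: List[str], start_index: int) -> Tuple[str, int]:
--     buffer: List[str] = []
--     index = start_index
--     total = len(lines)
--     while index < total:
--         raw = lines[index]
--         stripped = raw.strip()
--         if stripped == "---":
--             index += 1
--             continue
--         if raw.startswith("#### "):
--             break
--         if raw.startswith("### "):
--             break
--         if raw.startswith("## ") and not raw.startswith("###"):
--             break
--         buffer.append(raw.rstrip("\n"))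
--         index += 1
--     return "\n".join(buffer).strip(), index
-- ===== SOURCE B (Python) =====
-- from typing import List, Tuple
--
-- def _is_header(raw: str) -> bool:
--     return (raw.startswith("#### ")
--             or raw.startswith("### ")
--             or (raw.startswith("## ") and not raw.startswith("###")))
--
-- def _collect_intro_lines(lines: List[str], start_index: int) -> Tuple[str, int]:
--     total = len(lines)
--     end = start_index
--     while end < total and not _is_header(lines[end]):
--         end += 1
--     buffer = [lines[i].rstrip("\n") for i in range(start_index, end)
--               if lines[i].strip() != "---"]
--     return "\n".join(buffer).strip(), end
-- ===== Notes on version B (the rewrite author's own statement) =====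
-- stated objective: alternative
-- what changed: A interleaves boundary detection and content collection in one stateful loop with an accumulator; B first scans forward to find the index of the first header line, then builds the buffer as a comprehension over the slice, filtering out '---' separator lines.
import Mathlib
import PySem

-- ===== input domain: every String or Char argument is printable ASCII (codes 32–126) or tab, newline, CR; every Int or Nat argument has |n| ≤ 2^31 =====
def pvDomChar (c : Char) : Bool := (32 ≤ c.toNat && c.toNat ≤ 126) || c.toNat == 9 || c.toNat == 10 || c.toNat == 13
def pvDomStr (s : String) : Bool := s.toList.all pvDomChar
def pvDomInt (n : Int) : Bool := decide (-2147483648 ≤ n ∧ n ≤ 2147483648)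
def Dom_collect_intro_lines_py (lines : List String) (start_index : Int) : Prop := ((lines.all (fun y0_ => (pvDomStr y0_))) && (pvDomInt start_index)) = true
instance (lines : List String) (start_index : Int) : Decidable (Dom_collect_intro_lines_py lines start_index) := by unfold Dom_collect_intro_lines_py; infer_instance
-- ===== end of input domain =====

-- B separates boundary search from content extraction (find the first header index, then a
-- comprehension over the slice); same return value as A wherever A returns — objective: alternative.

-- shared helper: Python's raw.rstrip("\n") — exact: drops exactly the trailing '\n' characters
def pyRstripNewline (s : String) : String :=
  String.ofList ((s.toList.reverse.dropWhile (fun c => c == '\n')).reverse)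

-- ===== PORT A =====
def collectLoop (lines : List String) (total : Int) (buffer : List String) (index : Int) :
    List String × Int :=
  if _h : index < total then
    match PySem.List.pyGet? lines index with
    | none => (buffer, index)  -- Python raises IndexError here; excluded by Pre_
    | some raw =>
      if PySem.Str.strip raw = "---" then
        collectLoop lines total buffer (index + 1)
      else if PySem.Str.startswith raw "#### " then (buffer, index)
      else if PySem.Str.startswith raw "### " then (buffer, index)
      else if PySem.Str.startswith raw "## " && !(PySem.Str.startswith raw "###") then (buffer, index)
      else collectLoop lines total (buffer ++ [pyRstripNewline raw]) (index + 1)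
  else (buffer, index)
termination_by (total - index).toNat
decreasing_by all_goals omega

def collect_intro_lines_py (lines : List String) (start_index : Int) : String × Int :=
  let r := collectLoop lines (lines.length : Int) [] start_index
  (PySem.Str.strip (PySem.Str.join "\n" r.1), r.2)

-- ===== PORT B =====
def isHeaderLine (raw : String) : Bool :=
  PySem.Str.startswith raw "#### " || PySem.Str.startswith raw "### " ||
  (PySem.Str.startswith raw "## " && !(PySem.Str.startswith raw "###"))

def findEnd (lines : List String) (total : Int) (e : Int) : Int :=
  if _h : e < total then
    match PySem.List.pyGet? lines e with
    | none => e  -- Python raises IndexError here; excluded by Pre_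
    | some raw => if isHeaderLine raw then e else findEnd lines total (e + 1)
  else e
termination_by (total - e).toNat
decreasing_by all_goals omega

def introBuffer (lines : List String) (a b : Int) : List String :=
  (PySem.List.pyRange a b).filterMap (fun i =>
    match PySem.List.pyGet? lines i with
    | none => none  -- Python raises IndexError here; excluded by Pre_
    | some raw =>
      if PySem.Str.strip raw = "---" then none else some (pyRstripNewline raw))

def collect_intro_lines_py_alt (lines : List String) (start_index : Int) : String × Int :=
  let e := findEnd lines (lines.length : Int) start_index
  (PySem.Str.strip (PySem.Str.join "\n" (introBuffer lines start_index e)), e)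

-- ===== PRECONDITION & SPEC =====
-- A (and B) raise IndexError when start_index < -len(lines): the first lines[index] access
-- is out of range on the negative side. Those inputs are excluded; nothing else is.
def Pre_collect_intro_lines_py (lines : List String) (start_index : Int) : Prop :=
  -(lines.length : Int) ≤ start_index
instance (lines : List String) (start_index : Int) :
    Decidable (Pre_collect_intro_lines_py lines start_index) := by
  unfold Pre_collect_intro_lines_py; infer_instance

def pvWitness_collect_intro_lines_py : List String × Int := (["intro text", "## Header"], 0)

def Spec_collect_intro_lines_py (lines : List String) (start_index : Int) (out : String × Int) : Prop := out = collect_intro_lines_py_alt lines start_index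
instance (lines : List String) (start_index : Int) (out : String × Int) : Decidable (Spec_collect_intro_lines_py lines start_index out) := by unfold Spec_collect_intro_lines_py; infer_instance

-- ===== CLAIM (what is proved, stated in full; the proofs are below) =====
def Claim_equal_collect_intro_lines_py : Prop := ∀ (lines : List String) (start_index : Int), Dom_collect_intro_lines_py lines start_index → Pre_collect_intro_lines_py lines start_index → Spec_collect_intro_lines_py lines start_index (collect_intro_lines_py lines start_index)

-- ===== LEMMAS AND PROOFS =====

-- a line that strips to "---" cannot start with '#': stripping keeps the last non-space char
lemma strip_hash_ne (t : List Char) : PySem.Chars.strip ('#' :: t) ≠ ['-', '-', '-'] := by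
  intro h
  have hns : PySem.Chars.isspace '#' = false := by decide
  simp only [PySem.Chars.strip, PySem.Chars.lstrip, List.dropWhile, hns] at h
  simp only [PySem.Chars.rstrip] at h
  have h2 : List.dropWhile PySem.Chars.isspace (('#' :: t).reverse) = ['-', '-', '-'].reverse := by
    rw [← h, List.reverse_reverse]
  have hsuf : List.dropWhile PySem.Chars.isspace (('#' :: t).reverse) <:+ ('#' :: t).reverse :=
    List.dropWhile_suffix _
  rw [h2] at hsuf
  obtain ⟨u, hu⟩ := hsuf
  have := congrArg List.getLast? hu
  simp [List.getLast?_append, List.reverse_cons] at this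

lemma strip_str_hash_ne (raw p : String) (hp : PySem.Str.startswith raw p = true)
    (hh : p.toList.head? = some '#') : PySem.Str.strip raw ≠ "---" := by
  intro h
  have hpre : p.toList <+: raw.toList :=
    (PySem.Chars.startswith_iff raw.toList p.toList).mp (by simpa using hp)
  obtain ⟨t, ht⟩ := hpre
  have hl : (PySem.Str.strip raw).toList = ("---" : String).toList := by rw [h]
  rw [PySem.Str.toList_strip] at hl
  cases hps : p.toList with
  | nil => simp [hps] at hh
  | cons c cs =>
    rw [hps] at hh ht
    simp at hh
    subst hh
    have hraw : raw.toList = '#' :: (cs ++ t) := by rw [← ht]; simp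
    rw [hraw] at hl
    exact strip_hash_ne (cs ++ t) (by simpa using hl)

lemma stripped_dashes_not_header (raw : String) (h : PySem.Str.strip raw = "---") :
    isHeaderLine raw = false := by
  have e1 : PySem.Str.startswith raw "#### " = false := by
    cases hb : PySem.Str.startswith raw "#### " with
    | false => rfl
    | true => exact absurd h (strip_str_hash_ne raw "#### " hb (by decide))
  have e2 : PySem.Str.startswith raw "### " = false := by
    cases hb : PySem.Str.startswith raw "### " with
    | false => rfl
    | true => exact absurd h (strip_str_hash_ne raw "### " hb (by decide))
  have e3 : PySem.Str.startswith raw "## " = false := by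
    cases hb : PySem.Str.startswith raw "## " with
    | false => rfl
    | true => exact absurd h (strip_str_hash_ne raw "## " hb (by decide))
  have e1' : PySem.Chars.startswith raw.toList ['#','#','#','#',' '] = false := by simpa using e1
  have e2' : PySem.Chars.startswith raw.toList ['#','#','#',' '] = false := by simpa using e2
  have e3' : PySem.Chars.startswith raw.toList ['#','#',' '] = false := by simpa using e3
  simp [isHeaderLine, e1', e2', e3']

lemma le_findEnd (lines : List String) (total : Int) (e : Int) :
    e ≤ findEnd lines total e := by
  unfold findEnd
  split
  · rename_i h
    cases hg : PySem.List.pyGet? lines e with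
    | none => simp
    | some raw =>
      simp only
      split
      · exact le_refl e
      · have := le_findEnd lines total (e + 1)
        omega
  · exact le_refl e
termination_by (total - e).toNat
decreasing_by omega

lemma findEnd_stop (lines : List String) (total e : Int) (raw : String) (h : e < total)
    (hg : PySem.List.pyGet? lines e = some raw) (hh : isHeaderLine raw = true) :
    findEnd lines total e = e := by
  rw [findEnd, dif_pos h, hg]
  simp [hh]

lemma findEnd_step (lines : List String) (total e : Int) (raw : String) (h : e < total)
    (hg : PySem.List.pyGet? lines e = some raw) (hh : isHeaderLine raw = false) :
    findEnd lines total e = findEnd lines total (e + 1) := by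
  rw [findEnd, dif_pos h, hg]
  simp [hh]

lemma introBuffer_self (lines : List String) (a : Int) : introBuffer lines a a = [] := by
  unfold introBuffer
  rw [PySem.List.pyRange_one_eq_nil (le_refl a)]
  rfl

lemma introBuffer_step (lines : List String) (a b : Int) (raw : String) (h : a < b)
    (hg : PySem.List.pyGet? lines a = some raw) :
    introBuffer lines a b =
      (if PySem.Str.strip raw = "---" then [] else [pyRstripNewline raw]) ++
        introBuffer lines (a + 1) b := by
  unfold introBuffer
  rw [PySem.List.pyRange_one_cons h, List.filterMap_cons, hg]
  split <;> simp_all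

lemma loop_eq (lines : List String) (index : Int) (buffer : List String)
    (h : -(lines.length : Int) ≤ index) :
    collectLoop lines (lines.length : Int) buffer index =
      (buffer ++ introBuffer lines index (findEnd lines (lines.length : Int) index),
       findEnd lines (lines.length : Int) index) := by
  rw [collectLoop]
  split
  · rename_i hlt
    cases hg : PySem.List.pyGet? lines index with
    | none =>
      exfalso
      rw [PySem.List.pyGet?_eq_none_iff] at hg
      exact hg ⟨h, hlt⟩
    | some raw =>
      simp only
      by_cases hd : PySem.Str.strip raw = "---"
      · have hfe := findEnd_step lines _ index raw hlt hg (stripped_dashes_not_header raw hd)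
        have hle := le_findEnd lines (lines.length : Int) (index + 1)
        rw [if_pos hd, hfe, loop_eq lines (index + 1) buffer (by omega),
            introBuffer_step lines index _ raw (by omega) hg, if_pos hd, List.nil_append]
      · rw [if_neg hd]
        by_cases h1 : PySem.Str.startswith raw "#### "
        · rw [if_pos h1,
              findEnd_stop lines _ index raw hlt hg (by simp only [isHeaderLine, h1, Bool.true_or]),
              introBuffer_self, List.append_nil]
        · rw [if_neg h1]
          by_cases h2 : PySem.Str.startswith raw "### "
          · rw [if_pos h2,
                findEnd_stop lines _ index raw hlt hg
                  (by simp only [isHeaderLine, h2, Bool.true_or, Bool.or_true]),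
                introBuffer_self, List.append_nil]
          · rw [if_neg h2]
            by_cases h3 : (PySem.Str.startswith raw "## " && !(PySem.Str.startswith raw "###")) = true
            · rw [if_pos h3,
                  findEnd_stop lines _ index raw hlt hg (by simp only [isHeaderLine, h3, Bool.or_true]),
                  introBuffer_self, List.append_nil]
            · simp only [Bool.not_eq_true] at h1 h2 h3
              rw [if_neg (by rw [h3]; simp),
                  findEnd_step lines _ index raw hlt hg
                    (by
                      have h1' : PySem.Chars.startswith raw.toList ['#','#','#','#',' '] = false := by
                        simpa using h1
                      have h2' : PySem.Chars.startswith raw.toList ['#','#','#',' '] = false := by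
                        simpa using h2
                      have h3' : (PySem.Chars.startswith raw.toList ['#','#',' '] &&
                          !PySem.Chars.startswith raw.toList ['#','#','#']) = false := by
                        simpa using h3
                      simp only [Bool.and_eq_false_iff, Bool.not_eq_false'] at h3'
                      simp [isHeaderLine, h1', h2']
                      rcases h3' with h | h <;> simp [h]),
                  loop_eq lines (index + 1) (buffer ++ [pyRstripNewline raw]) (by omega)]
              have hle := le_findEnd lines (lines.length : Int) (index + 1)
              rw [introBuffer_step lines index _ raw (by omega) hg, if_neg hd]
              simp
  · rename_i hge
    rw [findEnd, dif_neg hge, introBuffer_self, List.append_nil]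
termination_by ((lines.length : Int) - index).toNat
decreasing_by all_goals omega

-- ===== VERDICT (by name: the statement is the Claim_ definition above) =====
theorem collect_intro_lines_py_spec : Claim_equal_collect_intro_lines_py := by
  intro lines start_index _hdom hpre
  unfold Spec_collect_intro_lines_py
  unfold collect_intro_lines_py collect_intro_lines_py_alt
  rw [loop_eq lines start_index [] hpre]
  simp
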